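-- pv_equiv track=rewrite | github.com/SeA-xiAoD/LearningPython | LeetCode/434/NumberofSegmentsinaString.py | countSegments
-- ===== SOURCE A (Python) =====
-- def countSegments(s):
--     """
--     :type s: str
--     :rtype: int
--     """
--     length = len(s)
--     p = 0
--     count = 0
--     while p < length:
--         tag = 0
--         while p < length and s[p] == ' ':
--             p += 1
--         while p < length and s[p] != ' ':
--             tag = 1
--             p += 1
--         if tag == 1:
--             count += 1
--     return count
-- ===== SOURCE B (Python) =====
-- def countSegments(s):
--     return sum(1 for prev, c in zip(' ' + s, s) if prev == ' ' and c != ' ')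
-- ===== Notes on version B (the rewrite author's own statement) =====
-- stated objective: idiomatic
-- what changed: Replaces A's nested skip-spaces/consume-word while-loops over an index with a single flat pass that counts word-start boundaries (previous char is a space, current char is not) via zip over the string shifted by one.
import Mathlib
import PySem

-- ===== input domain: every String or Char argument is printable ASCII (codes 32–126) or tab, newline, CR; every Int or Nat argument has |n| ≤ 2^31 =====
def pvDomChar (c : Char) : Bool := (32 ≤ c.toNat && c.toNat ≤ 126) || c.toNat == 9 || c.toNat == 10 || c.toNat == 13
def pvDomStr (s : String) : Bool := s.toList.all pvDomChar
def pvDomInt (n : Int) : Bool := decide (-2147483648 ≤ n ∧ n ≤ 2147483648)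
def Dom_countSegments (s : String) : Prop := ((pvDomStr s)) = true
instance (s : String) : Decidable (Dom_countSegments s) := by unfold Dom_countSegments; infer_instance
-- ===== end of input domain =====

-- B replaces A's nested skip-spaces/consume-word loops by one flat pass counting word-start
-- boundaries; same O(n) cost, proved to return the same count (objective: idiomatic).

-- ===== PORT A =====
-- inner loop 'while p < length and s[p] == ' ': p += 1' over the remaining suffix
def pvSkipA : List Char → List Char
  | [] => []
  | c :: cs => if c = ' ' then pvSkipA cs else c :: cs

-- inner loop 'while p < length and s[p] != ' ': tag = 1; p += 1': returns (tag, remaining suffix)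
def pvWordA : List Char → Nat × List Char
  | [] => (0, [])
  | c :: cs => if c = ' ' then (0, c :: cs) else (1, (pvWordA cs).2)

theorem pvWordA_len_le (l : List Char) : ((pvWordA l).2).length ≤ l.length := by
  induction l with
  | nil => simp [pvWordA]
  | cons c cs ih =>
    simp only [pvWordA]
    split
    · simp
    · exact Nat.le_trans ih (Nat.le_succ _)

theorem pvSkipA_len_le (l : List Char) : (pvSkipA l).length ≤ l.length := by
  induction l with
  | nil => simp [pvSkipA]
  | cons c cs ih =>
    simp only [pvSkipA]
    split
    · exact Nat.le_trans ih (Nat.le_succ _)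
    · simp

theorem pvSkipA_head_ne (l : List Char) (d : Char) (ds : List Char)
    (h : pvSkipA l = d :: ds) : d ≠ ' ' := by
  induction l with
  | nil => simp [pvSkipA] at h
  | cons c cs ih =>
    simp only [pvSkipA] at h
    split at h
    · exact ih h
    · rename_i hc; cases h; simpa using hc

theorem pvLoopA_dec (c : Char) (cs : List Char) :
    ((pvWordA (pvSkipA (c :: cs))).2).length < (c :: cs).length := by
  cases h : pvSkipA (c :: cs) with
  | nil => simp [pvWordA]
  | cons d ds =>
    have hle : (d :: ds).length ≤ (c :: cs).length := h ▸ pvSkipA_len_le (c :: cs)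
    have hd : d ≠ ' ' := pvSkipA_head_ne _ _ _ h
    simp only [pvWordA, if_neg hd]
    exact Nat.lt_of_lt_of_le (Nat.lt_of_le_of_lt (pvWordA_len_le ds) (by simp)) hle

-- outer 'while p < length' loop; count accumulated as the sum of iteration contributions
def pvLoopA : List Char → Int
  | [] => 0
  | c :: cs =>
    (if (pvWordA (pvSkipA (c :: cs))).1 = 1 then 1 else 0) + pvLoopA (pvWordA (pvSkipA (c :: cs))).2
  termination_by l => l.length
  decreasing_by exact pvLoopA_dec c cs

def countSegments (s : String) : Int := pvLoopA s.toList

-- ===== PORT B =====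
-- sum(1 for prev, c in zip(' ' + s, s) if prev == ' ' and c != ' ')
def countSegments_alt (s : String) : Int :=
  ((((' ' :: s.toList).zip s.toList).filter (fun q => q.1 == ' ' && q.2 != ' ')).length : Int)

-- ===== PRECONDITION & SPEC =====
def Spec_countSegments (s : String) (out : Int) : Prop := out = countSegments_alt s
instance (s : String) (out : Int) : Decidable (Spec_countSegments s out) := by unfold Spec_countSegments; infer_instance

-- ===== CLAIM (what is proved, stated in full; the proofs are below) =====
def Claim_equal_countSegments : Prop := ∀ (s : String), Dom_countSegments s → Spec_countSegments s (countSegments s)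

-- ===== LEMMAS AND PROOFS =====

-- reference count: number of word starts in l given the previous character p
def pvF (p : Char) (l : List Char) : Int :=
  match l with
  | [] => 0
  | c :: cs => (if p = ' ' ∧ c ≠ ' ' then 1 else 0) + pvF c cs

theorem pvB_eq_pvF (p : Char) (l : List Char) :
    ((((p :: l).zip l).filter (fun q => q.1 == ' ' && q.2 != ' ')).length : Int) = pvF p l := by
  induction l generalizing p with
  | nil => simp [pvF]
  | cons c cs ih =>
    simp only [List.zip_cons_cons, List.filter_cons, pvF]
    by_cases hp : p = ' ' ∧ c ≠ ' '
    · have : (p == ' ' && c != ' ') = true := by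
        simp [hp.1, bne_iff_ne, hp.2]
      simp only [this, if_pos hp, List.length_cons, if_true]
      push_cast
      rw [ih c]; ring
    · have : (p == ' ' && c != ' ') = false := by
        rcases not_and_or.mp hp with h | h
        · simp [beq_eq_false_iff_ne.mpr h]
        · have : c = ' ' := not_not.mp h
          simp [this]
      simp only [this, Bool.false_eq_true, if_false]
      rw [if_neg hp, ih c]; ring

theorem pvF_skip (l : List Char) : pvF ' ' (pvSkipA l) = pvF ' ' l := by
  induction l with
  | nil => rfl
  | cons c cs ih =>
    simp only [pvSkipA]
    by_cases hc : c = ' '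
    · rw [if_pos hc, ih]
      simp [pvF, hc]
    · rw [if_neg hc]

theorem pvF_word (l : List Char) (p : Char) (hp : p ≠ ' ') :
    pvF p l = pvF ' ' ((pvWordA l).2) := by
  induction l generalizing p with
  | nil => rfl
  | cons c cs ih =>
    by_cases hc : c = ' '
    · subst hc
      simp [pvWordA, pvF, hp]
    · simp only [pvWordA, if_neg hc, pvF]
      rw [if_neg (fun h => hp h.1), ih c hc]; ring

theorem pvLoopA_eq_pvF (l : List Char) : pvLoopA l = pvF ' ' l := by
  induction l using pvLoopA.induct with
  | case1 => simp [pvLoopA, pvF]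
  | case2 c cs ih =>
    rw [pvLoopA]
    cases hsk : pvSkipA (c :: cs) with
    | nil =>
      have h0 : pvF ' ' (c :: cs) = 0 := by rw [← pvF_skip, hsk]; rfl
      simp [pvWordA, pvLoopA, h0]
    | cons d ds =>
      have hd : d ≠ ' ' := pvSkipA_head_ne _ _ _ hsk
      rw [hsk] at ih
      simp only [pvWordA, if_neg hd] at ih ⊢
      rw [ih]
      have hc : pvF ' ' (c :: cs) = pvF ' ' (d :: ds) := by rw [← pvF_skip, hsk]
      rw [hc]
      simp only [pvF]
      rw [pvF_word ds d hd]
      simp [hd]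

-- ===== VERDICT (by name: the statement is the Claim_ definition above) =====
theorem countSegments_spec : Claim_equal_countSegments := by
  intro s _
  unfold Spec_countSegments countSegments countSegments_alt
  rw [pvB_eq_pvF, pvLoopA_eq_pvF]
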